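-- pv_equiv track=rewrite | github.com/pypi-data/pypi-mirror-121 | packages/nlp-text-corrector/nlp_text_corrector-0.0.3-py3-none-any.whl/nlp_text_corrector/asr_post_process.py | _corrections
-- ===== SOURCE A (Python) =====
-- months = ["january", "february", "march", "april", "may", "june", "july", "august", "september", "october", "november", "december"]
--
-- def _corrections(fstring):
--     fstring = fstring.replace("1st name", "first name")
--     fstring = fstring.replace("1st class", "first class")
--     fstring = fstring.replace("1 way", "one way")
--     fstring = fstring.replace("2 way", "two way")
--     fstring = fstring.split()
--     for i,word in enumerate(fstring):
--         if word in months and (i+1)<len(fstring) and fstring[i+1].isdigit():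
--             if len(fstring[i+1])>=5:
--                 year = fstring[i+1][-4:]
--                 date = fstring[i+1][:-4]
--                 fstring[i+1] = date
--                 fstring.insert(i+2, year)
--     fstring = " ".join(fstring)
--     return fstring
-- ===== SOURCE B (Python) =====
-- months = ["january", "february", "march", "april", "may", "june", "july", "august", "september", "october", "november", "december"]
--
-- _REPLACEMENTS = [("1st name", "first name"), ("1st class", "first class"),
--                  ("1 way", "one way"), ("2 way", "two way")]
--
-- def _corrections(fstring):
--     for old, new in _REPLACEMENTS:
--         fstring = fstring.replace(old, new)
--     out = []
--     prev = ""
--     for word in fstring.split():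
--         if prev in months and word.isdigit() and len(word) >= 5:
--             out.append(word[:-4])
--             out.append(word[-4:])
--         else:
--             out.append(word)
--         prev = word
--     return " ".join(out)
-- ===== Notes on version B (the rewrite author's own statement) =====
-- stated objective: simpler
-- what changed: The four textual replacements are driven by a list of (old,new) pairs, and the year splitting is done in one forward pass over the split words with look-back on the previous original word, building a new list, instead of A's look-ahead check that mutates the list (reassigns fstring[i+1] and inserts) while enumerating it.
import Mathlib
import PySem

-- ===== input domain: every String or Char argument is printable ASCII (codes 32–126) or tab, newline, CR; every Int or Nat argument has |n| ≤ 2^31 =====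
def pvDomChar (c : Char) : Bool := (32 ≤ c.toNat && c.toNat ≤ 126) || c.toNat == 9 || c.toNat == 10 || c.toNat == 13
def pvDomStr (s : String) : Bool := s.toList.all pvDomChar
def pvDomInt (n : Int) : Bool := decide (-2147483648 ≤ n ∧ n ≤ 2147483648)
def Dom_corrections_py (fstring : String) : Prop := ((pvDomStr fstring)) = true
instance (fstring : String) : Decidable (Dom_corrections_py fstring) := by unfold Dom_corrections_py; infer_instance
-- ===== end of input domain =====

-- B replaces A's mutate-the-list-while-enumerating year splitting by a single forward
-- pass with look-back on the previous original word (simpler; no mutation during iteration).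

-- ===== PORT A =====
def pvMonths : List String := ["january", "february", "march", "april", "may", "june", "july", "august", "september", "october", "november", "december"]

/-- Port of A's `for i,word in enumerate(fstring)` loop.  Python's list iterator walks the
LIVE list by index while the body mutates it (`fstring[i+1] = date`; `fstring.insert(i+2, year)`),
so it is ported as an index loop over the current list; the fuel argument only makes the same
computation total (one unit per iteration; `2*length+1` always suffices because every iteration
grows the list by at most one while consuming one index — proved by the main lemma below). -/
def corrLoopA : Nat → Nat → List String → List String
  | 0, _, l => l
  | fuel+1, i, l =>
    if i < l.length then
      let word := l.getD i ""
      if pvMonths.contains word && decide (i+1 < l.length)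
          && PySem.Str.strIsdigit (l.getD (i+1) "") then
        if decide (5 ≤ PySem.Str.len (l.getD (i+1) "")) then
          let year := PySem.Str.slice (l.getD (i+1) "") (some (-4)) none
          let date := PySem.Str.slice (l.getD (i+1) "") none (some (-4))
          corrLoopA fuel (i+1) (PySem.List.insert (l.set (i+1) date) ((i+2 : Nat) : Int) year)
        else corrLoopA fuel (i+1) l
      else corrLoopA fuel (i+1) l
    else l

def corrections_py (fstring : String) : String :=
  let s1 := PySem.Str.replace fstring "1st name" "first name"
  let s2 := PySem.Str.replace s1 "1st class" "first class"
  let s3 := PySem.Str.replace s2 "1 way" "one way"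
  let s4 := PySem.Str.replace s3 "2 way" "two way"
  let ws := PySem.Str.split₀ s4
  PySem.Str.join " " (corrLoopA (2*ws.length+1) 0 ws)

-- ===== PORT B =====
def pvReplacements : List (String × String) :=
  [("1st name", "first name"), ("1st class", "first class"), ("1 way", "one way"), ("2 way", "two way")]

/-- Port of B's single forward pass: build the output list, tracking the previous
original word (`prev`); a digit word of length ≥ 5 after a month is emitted split. -/
def corrLoopB : String → List String → List String
  | _, [] => []
  | prev, w :: ws =>
    if pvMonths.contains prev && PySem.Str.strIsdigit w && decide (5 ≤ PySem.Str.len w) then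
      PySem.Str.slice w none (some (-4)) :: PySem.Str.slice w (some (-4)) none :: corrLoopB w ws
    else
      w :: corrLoopB w ws

def corrections_py_alt (fstring : String) : String :=
  let s := pvReplacements.foldl (fun acc p => PySem.Str.replace acc p.1 p.2) fstring
  PySem.Str.join " " (corrLoopB "" (PySem.Str.split₀ s))

-- ===== PRECONDITION & SPEC =====
def Spec_corrections_py (fstring : String) (out : String) : Prop := out = corrections_py_alt fstring
instance (fstring : String) (out : String) : Decidable (Spec_corrections_py fstring out) := by unfold Spec_corrections_py; infer_instance

-- ===== CLAIM (what is proved, stated in full; the proofs are below) =====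
def Claim_equal_corrections_py : Prop := ∀ (fstring : String), Dom_corrections_py fstring → Spec_corrections_py fstring (corrections_py fstring)

-- ===== LEMMAS AND PROOFS =====

/-- whether the word before position `i` (in the current list) is a month -/
def pvMonthAt (l : List String) (i : Nat) : Bool :=
  if i = 0 then false else pvMonths.contains (l.getD (i-1) "")

lemma digit_not_month (s : String) (h : PySem.Str.strIsdigit s = true) :
    pvMonths.contains s = false := by
  cases hc : pvMonths.contains s with
  | false => rfl
  | true =>
    exfalso
    simp [pvMonths] at hc
    rcases hc with rfl|rfl|rfl|rfl|rfl|rfl|rfl|rfl|rfl|rfl|rfl|rfl <;> exact absurd h (by decide)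

lemma date_digit (d : String) (hd : PySem.Str.strIsdigit d = true) (hl : 5 ≤ PySem.Str.len d) :
    PySem.Str.strIsdigit (PySem.Str.slice d none (some (-4))) = true := by
  have hlen : 5 ≤ d.toList.length := by rw [PySem.Str.len_eq] at hl; exact_mod_cast hl
  rw [PySem.Str.strIsdigit_eq, PySem.Str.toList_slice, PySem.Chars.slice_eq_listSlice,
    PySem.List.slice_to_neg_ofNat d.toList 4 (by omega)]
  rw [PySem.Str.strIsdigit_eq] at hd
  simp only [PySem.Chars.strIsdigit, Bool.and_eq_true, Bool.not_eq_true', List.all_eq_true] at hd ⊢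
  refine ⟨?_, fun c hc => hd.2 c (List.mem_of_mem_take hc)⟩
  rcases he : d.toList.take (d.toList.length - 4) with _ | ⟨c, cs⟩
  · have hL := congrArg List.length he
    rw [List.length_take_of_le (by omega)] at hL
    simp only [List.length_nil] at hL
    omega
  · rfl

lemma year_digit (d : String) (hd : PySem.Str.strIsdigit d = true) (hl : 5 ≤ PySem.Str.len d) :
    PySem.Str.strIsdigit (PySem.Str.slice d (some (-4)) none) = true := by
  have hlen : 5 ≤ d.toList.length := by rw [PySem.Str.len_eq] at hl; exact_mod_cast hl
  rw [PySem.Str.strIsdigit_eq, PySem.Str.toList_slice, PySem.Chars.slice_eq_listSlice,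
    PySem.List.slice_from_neg_ofNat d.toList 4 (by omega)]
  rw [PySem.Str.strIsdigit_eq] at hd
  simp only [PySem.Chars.strIsdigit, Bool.and_eq_true, Bool.not_eq_true', List.all_eq_true] at hd ⊢
  refine ⟨?_, fun c hc => hd.2 c (List.mem_of_mem_drop hc)⟩
  rcases he : d.toList.drop (d.toList.length - 4) with _ | ⟨c, cs⟩
  · have hL := congrArg List.length he
    rw [List.length_drop] at hL
    simp only [List.length_nil] at hL
    omega
  · rfl

lemma insert_set_eq (l : List String) (i : Nat) (date year : String) (h : i+1 < l.length) :
    PySem.List.insert (l.set (i+1) date) ((i+2 : Nat) : Int) year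
      = l.take (i+1) ++ date :: year :: l.drop (i+2) := by
  rw [PySem.List.insert_natCast _ _ _ (by simpa using (by omega : i+2 ≤ l.length))]
  rw [List.set_eq_take_append_cons_drop, if_pos h]
  have hlt : (List.take (i+1) l).length = i+1 := List.length_take_of_le (by omega)
  rw [List.take_append, List.drop_append, hlt]
  rw [List.take_of_length_le (by omega : (List.take (i+1) l).length ≤ i+2),
      List.drop_of_length_le (by omega : (List.take (i+1) l).length ≤ i+2)]
  simp [(by omega : i+2-(i+1) = 1)]

lemma getD_mid (xs : List String) (y : String) (t : List String) :
    (xs ++ y :: t).getD xs.length "" = y := by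
  rw [List.getD_eq_getElem _ _ (by simp)]
  simp

lemma getD_mid1 (xs : List String) (y z : String) (t : List String) :
    (xs ++ y :: z :: t).getD (xs.length+1) "" = z := by
  rw [List.getD_eq_getElem _ _ (by simp)]
  rw [List.getElem_append_right (by omega)]
  simp

/-- the common "no mutation at this index" step of the loop equivalence -/
lemma corrLoop_skip (f i : Nat) (l : List String) (prev : String)
    (hi : i < l.length)
    (hIH : corrLoopA f (i+1) l = l.take (i+1) ++ corrLoopB (l[i]'hi) (l.drop (i+1)))
    (h3 : (pvMonths.contains prev && PySem.Str.strIsdigit (l.getD i "")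
        && decide (5 ≤ PySem.Str.len (l.getD i ""))) = false) :
    corrLoopA f (i+1) l = l.take i ++ corrLoopB prev (l.drop i) := by
  rw [hIH, List.drop_eq_getElem_cons hi]
  rw [List.getD_eq_getElem l "" hi] at h3
  simp only [corrLoopB, h3]
  simp only [Bool.false_eq_true, if_false]
  rw [List.take_succ_eq_append_getElem hi, List.append_assoc]
  rfl

lemma corrLoop_eq (fuel : Nat) : ∀ (l : List String) (i : Nat) (prev : String),
    2 * (l.length - i) ≤ fuel →
    pvMonths.contains prev = pvMonthAt l i →
    (pvMonths.contains prev && PySem.Str.strIsdigit (l.getD i "")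
        && decide (5 ≤ PySem.Str.len (l.getD i ""))) = false →
    corrLoopA fuel i l = l.take i ++ corrLoopB prev (l.drop i) := by
  induction fuel using Nat.strong_induction_on with
  | _ fuel IH =>
  intro l i prev hfuel h1 h3
  by_cases hi : i < l.length
  · obtain ⟨f, rfl⟩ : ∃ f, fuel = f+1 := ⟨fuel-1, by omega⟩
    have h1' : pvMonths.contains (l[i]'hi) = pvMonthAt l (i+1) := by
      unfold pvMonthAt
      rw [if_neg (by omega), Nat.add_sub_cancel, List.getD_eq_getElem l "" hi]
    simp only [corrLoopA]
    rw [if_pos hi]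
    by_cases hnext : i+1 < l.length
    · have hgd1 : l.getD (i+1) "" = l[i+1]'hnext := List.getD_eq_getElem l "" hnext
      by_cases hw : pvMonths.contains (l[i]'hi) = true
      · by_cases hdig : PySem.Str.strIsdigit (l[i+1]'hnext) = true
        · by_cases hlen5 : 5 ≤ PySem.Str.len (l[i+1]'hnext)
          · -- the SPLIT case: A mutates; unfold the two extra iterations over date and year
            rw [List.getD_eq_getElem l "" hi, hgd1]
            have hca : (pvMonths.contains (l[i]'hi) && decide (i+1 < l.length)
                && PySem.Str.strIsdigit (l[i+1]'hnext)) = true := by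
              rw [hw, hdig]; simp [hnext]
            rw [if_pos hca, if_pos (show decide (5 ≤ PySem.Str.len (l[i+1]'hnext)) = true by simpa using hlen5)]
            rw [insert_set_eq l i _ _ hnext]
            have hlt : (l.take (i+1)).length = i+1 := List.length_take_of_le (by omega)
            set date := PySem.Str.slice (l[i+1]'hnext) none (some (-4)) with hdate
            set year := PySem.Str.slice (l[i+1]'hnext) (some (-4)) none with hyear
            set E := l.take (i+1) ++ date :: year :: l.drop (i+2) with hE
            have hElen : E.length = l.length + 1 := by
              simp [hE, List.length_take]; omega
            have hgdE1 : E.getD (i+1) "" = date := by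
              have h := getD_mid (l.take (i+1)) date (year :: l.drop (i+2))
              rw [hlt] at h; exact h
            have hgdE2 : E.getD (i+2) "" = year := by
              have h := getD_mid1 (l.take (i+1)) date year (l.drop (i+2))
              rw [hlt] at h; exact h
            have hmdate : pvMonths.contains date = false :=
              digit_not_month _ (date_digit _ hdig hlen5)
            have hmyear : pvMonths.contains year = false :=
              digit_not_month _ (year_digit _ hdig hlen5)
            have hmd : pvMonths.contains (l[i+1]'hnext) = false := digit_not_month _ hdig
            obtain ⟨f2, rfl⟩ : ∃ f2, f = f2+2 := ⟨f-2, by omega⟩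
            simp only [corrLoopA]
            rw [if_pos (show i+1 < E.length by omega), hgdE1, hmdate]
            simp only [Bool.false_and, Bool.false_eq_true, if_false]
            rw [if_pos (show i+1+1 < E.length by omega)]
            rw [show i+1+1 = i+2 from rfl, hgdE2, hmyear]
            simp only [Bool.false_and, Bool.false_eq_true, if_false]
            have hIH := IH f2 (by omega) E (i+2+1) (l[i+1]'hnext)
              (by omega)
              (by unfold pvMonthAt
                  rw [if_neg (by omega), Nat.add_sub_cancel, hgdE2, hmd, hmyear])
              (by rw [hmd]; simp)
            rw [hIH]
            have hEtake : E.take (i+2+1) = l.take (i+1) ++ [date, year] := by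
              rw [hE, List.take_append, List.take_of_length_le (by omega), hlt,
                 (by omega : i+2+1-(i+1) = 2)]
              simp
            have hEdrop : E.drop (i+2+1) = l.drop (i+2) := by
              rw [hE, List.drop_append, List.drop_of_length_le (by omega), hlt,
                 (by omega : i+2+1-(i+1) = 2)]
              simp
            rw [hEtake, hEdrop]
            have hcb : (pvMonths.contains prev && PySem.Str.strIsdigit (l[i]'hi)
                && decide (5 ≤ PySem.Str.len (l[i]'hi))) = false := by
              rw [List.getD_eq_getElem l "" hi] at h3; exact h3
            rw [List.drop_eq_getElem_cons hi]
            simp only [corrLoopB, hcb]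
            simp only [Bool.false_eq_true, if_false]
            rw [List.drop_eq_getElem_cons hnext]
            simp only [corrLoopB]
            rw [if_pos (show (pvMonths.contains (l[i]'hi) && PySem.Str.strIsdigit (l[i+1]'hnext)
              && decide (5 ≤ PySem.Str.len (l[i+1]'hnext))) = true by rw [hw, hdig]; simpa using hlen5)]
            rw [List.take_succ_eq_append_getElem hi, List.append_assoc, List.append_assoc]
            rfl
          · rw [List.getD_eq_getElem l "" hi, hgd1]
            have hca : (pvMonths.contains (l[i]'hi) && decide (i+1 < l.length)
                && PySem.Str.strIsdigit (l[i+1]'hnext)) = true := by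
              rw [hw, hdig]; simp [hnext]
            rw [if_pos hca, if_neg (show ¬ decide (5 ≤ PySem.Str.len (l[i+1]'hnext)) = true by simpa using hlen5)]
            exact corrLoop_skip _ _ _ _ hi (IH f (by omega) l (i+1) _ (by omega) h1'
              (by rw [hgd1, decide_eq_false hlen5]; simp)) h3
        · rw [List.getD_eq_getElem l "" hi, hgd1]
          rw [if_neg (show ¬ (pvMonths.contains (l[i]'hi) && decide (i+1 < l.length)
              && PySem.Str.strIsdigit (l[i+1]'hnext)) = true by
                rw [Bool.eq_false_iff.mpr hdig]; simp)]
          exact corrLoop_skip _ _ _ _ hi (IH f (by omega) l (i+1) _ (by omega) h1'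
            (by rw [hgd1, Bool.eq_false_iff.mpr hdig]; simp)) h3
      · rw [List.getD_eq_getElem l "" hi, hgd1]
        rw [if_neg (show ¬ (pvMonths.contains (l[i]'hi) && decide (i+1 < l.length)
            && PySem.Str.strIsdigit (l[i+1]'hnext)) = true by
              rw [Bool.eq_false_iff.mpr hw]; simp)]
        exact corrLoop_skip _ _ _ _ hi (IH f (by omega) l (i+1) _ (by omega) h1'
          (by rw [Bool.eq_false_iff.mpr hw]; simp)) h3
    · have hgd1 : l.getD (i+1) "" = "" := List.getD_eq_default _ _ (by omega)
      rw [List.getD_eq_getElem l "" hi, hgd1]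
      rw [if_neg (show ¬ (pvMonths.contains (l[i]'hi) && decide (i+1 < l.length)
          && PySem.Str.strIsdigit "") = true by simp [hnext])]
      exact corrLoop_skip _ _ _ _ hi (IH f (by omega) l (i+1) _ (by omega) h1'
        (by rw [hgd1, show PySem.Str.strIsdigit "" = false from rfl]; simp)) h3
  · have hdrop : l.drop i = [] := List.drop_eq_nil_of_le (by omega)
    have htake : l.take i = l := List.take_of_length_le (by omega)
    cases fuel with
    | zero => simp [corrLoopA, corrLoopB, hdrop, htake]
    | succ f => simp [corrLoopA, corrLoopB, hi, hdrop, htake]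

-- ===== VERDICT (by name: the statement is the Claim_ definition above) =====
theorem corrections_py_spec : Claim_equal_corrections_py := by
  intro fstring _
  have top : ∀ ws : List String, corrLoopA (2*ws.length+1) 0 ws = corrLoopB "" ws := by
    intro ws
    have hc : pvMonths.contains "" = false := by decide
    have h := corrLoop_eq (2*ws.length+1) ws 0 "" (by omega) (by rw [hc]; rfl)
      (by rw [hc]; simp only [Bool.false_and])
    simpa only [List.take_zero, List.drop_zero, List.nil_append] using h
  unfold Spec_corrections_py corrections_py corrections_py_alt
  simp only [pvReplacements, List.foldl]
  rw [top]
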